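-- pv_equiv track=rewrite | github.com/yigitarsland/serverLogAnalyzer | log_analyzer.py | ip_find
-- ===== SOURCE A (Python) =====
-- def ip_requests_number(log_data):
--     ip_requests = {}  # Initialize an empty dictionary to store IP request counts
--     for entry in log_data:
--         ip = entry['ip']  # Get the IP address from the log entry
--         ip_requests[ip] = ip_requests.get(ip, 0) + 1  # Increment the count for the IP address
--     return ip_requests
--
-- def ip_find(log_data, most_active=True):
--     ip_counts = ip_requests_number(log_data)  # Get the dictionary of IP request counts
--     if most_active:
--         max_requests = max(ip_counts.values())  # Find the maximum number of requests
--         most_active_ips = [ip for ip, count in ip_counts.items() if count == max_requests]  # Find IPs with maximum requests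
--         return most_active_ips
--     else:
--         min_requests = min(ip_counts.values())  # Find the minimum number of requests
--         least_active_ips = [ip for ip, count in ip_counts.items() if count == min_requests]  # Find IPs with minimum requests
--         return least_active_ips
-- ===== SOURCE B (Python) =====
-- def ip_find(log_data, most_active=True):
--     counts = {}
--     for entry in log_data:
--         ip = entry['ip']
--         counts[ip] = counts.get(ip, 0) + 1
--     best = None
--     result = []
--     for ip, c in counts.items():
--         if best is None or (c > best if most_active else c < best):
--             best = c
--             result = [ip]
--         elif c == best:
--             result.append(ip)
--     return result
-- ===== Notes on version B (the rewrite author's own statement) =====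
-- stated objective: alternative
-- what changed: Replaces max/min over the values plus a second filtering pass over the items with one single scan over the counted items that maintains the running extreme and the list of IPs attaining it (reset on a strictly better count, append on a tie).
import Mathlib
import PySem

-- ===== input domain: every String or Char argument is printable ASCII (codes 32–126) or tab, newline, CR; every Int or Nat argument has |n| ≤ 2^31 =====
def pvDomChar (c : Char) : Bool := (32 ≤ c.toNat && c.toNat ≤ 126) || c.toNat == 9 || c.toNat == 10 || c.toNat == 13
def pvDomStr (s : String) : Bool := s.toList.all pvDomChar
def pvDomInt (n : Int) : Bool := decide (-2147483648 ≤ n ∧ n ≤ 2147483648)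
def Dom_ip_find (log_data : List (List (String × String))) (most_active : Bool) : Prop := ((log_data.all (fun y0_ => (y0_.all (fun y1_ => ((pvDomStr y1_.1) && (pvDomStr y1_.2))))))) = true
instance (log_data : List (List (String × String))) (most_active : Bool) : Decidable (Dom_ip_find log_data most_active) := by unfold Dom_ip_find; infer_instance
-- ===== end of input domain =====

-- B replaces A's extreme-then-filter two passes over the counted items by one scan keeping
-- the running extreme and the list of IPs attaining it (alternative decomposition, same cost).

-- ===== PORT A =====
-- helper ip_requests_number: count requests per IP
def ipRequestsNumber (log_data : List (List (String × String))) : PySem.Dict String Int :=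
  log_data.foldl (fun d entry =>
    let ip := (PySem.Dict.mk entry).getD "ip" ""  -- entry['ip']; Pre_ guarantees the key is present
    d.insert ip (d.getD ip 0 + 1)) PySem.Dict.empty

def ip_find (log_data : List (List (String × String))) (most_active : Bool) : List String :=
  let ip_counts := ipRequestsNumber log_data
  if most_active then
    match PySem.List.max? (PySem.Dict.values ip_counts) (fun y => y) with
    | some max_requests =>
        ((PySem.Dict.items ip_counts).filter (fun p => p.2 == max_requests)).map (fun p => p.1)
    | none => []  -- Python raises ValueError here (max of empty sequence); excluded by Pre_
  else
    match PySem.List.min? (PySem.Dict.values ip_counts) (fun y => y) with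
    | some min_requests =>
        ((PySem.Dict.items ip_counts).filter (fun p => p.2 == min_requests)).map (fun p => p.1)
    | none => []  -- Python raises ValueError here (min of empty sequence); excluded by Pre_

-- ===== PORT B =====
-- one step of Source B's scan over counts.items(): best is None → start; strictly better → reset; tie → append
def ipFindStep (most_active : Bool) (st : Option Int × List String) (p : String × Int) :
    Option Int × List String :=
  match st.1 with
  | none => (some p.2, [p.1])
  | some best =>
    if (if most_active then best < p.2 else p.2 < best) then (some p.2, [p.1])
    else if p.2 == best then (st.1, st.2 ++ [p.1])
    else st

def ip_find_alt (log_data : List (List (String × String))) (most_active : Bool) : List String :=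
  let counts := log_data.foldl (fun d entry =>
    let ip := (PySem.Dict.mk entry).getD "ip" ""  -- entry['ip']; Pre_ guarantees the key is present
    d.insert ip (d.getD ip 0 + 1)) PySem.Dict.empty
  ((PySem.Dict.items counts).foldl (ipFindStep most_active) (none, [])).2

-- ===== PRECONDITION & SPEC =====
-- Pre_ excludes empty log_data (A's max/min raises ValueError) and entries lacking an 'ip' key
-- (entry['ip'] raises KeyError); A returns on everything else.
def Pre_ip_find (log_data : List (List (String × String))) (most_active : Bool) : Prop :=
  log_data ≠ [] ∧ ∀ entry ∈ log_data, (PySem.Dict.mk entry).contains "ip" = true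
instance (log_data : List (List (String × String))) (most_active : Bool) : Decidable (Pre_ip_find log_data most_active) := by unfold Pre_ip_find; infer_instance

def pvWitness_ip_find : (List (List (String × String))) × Bool :=
  ([[("ip", "1.2.3.4")], [("ip", "1.2.3.4")], [("ip", "5.6.7.8")]], true)

def Spec_ip_find (log_data : List (List (String × String))) (most_active : Bool) (out : List String) : Prop := out = ip_find_alt log_data most_active
instance (log_data : List (List (String × String))) (most_active : Bool) (out : List String) : Decidable (Spec_ip_find log_data most_active out) := by unfold Spec_ip_find; infer_instance

-- ===== CLAIM (what is proved, stated in full; the proofs are below) =====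
def Claim_equal_ip_find : Prop := ∀ (log_data : List (List (String × String))) (most_active : Bool), Dom_ip_find log_data most_active → Pre_ip_find log_data most_active → Spec_ip_find log_data most_active (ip_find log_data most_active)

-- ===== LEMMAS AND PROOFS =====

lemma le_foldl_max2 (l : List (String × Int)) : ∀ b : Int, b ≤ l.foldl (fun m p => max m p.2) b := by
  induction l with
  | nil => intro b; simp
  | cons p t ih =>
    intro b
    calc b ≤ max b p.2 := le_max_left _ _
      _ ≤ t.foldl (fun m p => max m p.2) (max b p.2) := ih _
      _ = (p :: t).foldl (fun m p => max m p.2) b := rfl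

lemma foldl_min2_le (l : List (String × Int)) : ∀ b : Int, l.foldl (fun m p => min m p.2) b ≤ b := by
  induction l with
  | nil => intro b; simp
  | cons p t ih =>
    intro b
    calc (p :: t).foldl (fun m p => min m p.2) b
        = t.foldl (fun m p => min m p.2) (min b p.2) := rfl
      _ ≤ min b p.2 := ih _
      _ ≤ b := min_le_left _ _

-- invariant of B's scan (most_active = true): running best is the fold-max, the accumulator is
-- the old one iff the max did not improve, followed by the IPs of the tail attaining the max
lemma scan_max (l : List (String × Int)) : ∀ (b : Int) (acc : List String),
    l.foldl (ipFindStep true) (some b, acc)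
      = (some (l.foldl (fun m p => max m p.2) b),
         (if l.foldl (fun m p => max m p.2) b = b then acc else [])
           ++ (l.filter (fun p => p.2 == l.foldl (fun m p => max m p.2) b)).map (fun p => p.1)) := by
  induction l with
  | nil => intro b acc; simp
  | cons p t ih =>
    intro b acc
    have hle : ∀ c : Int, c ≤ t.foldl (fun m p => max m p.2) c := le_foldl_max2 t
    simp only [List.foldl_cons]
    by_cases h1 : b < p.2
    · have hstep : ipFindStep true (some b, acc) p = (some p.2, [p.1]) := by
        simp [ipFindStep, h1]
      rw [hstep, ih p.2 [p.1]]
      have hmax : max b p.2 = p.2 := by omega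
      simp only [hmax]
      have hMb : t.foldl (fun m p => max m p.2) p.2 ≠ b := by
        have := hle p.2; omega
      by_cases h2 : p.2 = t.foldl (fun m p => max m p.2) p.2
      · simp [← h2, hMb]
        exact fun h => absurd h (by omega)
      · simp [hMb, Ne.symm h2, h2]
    · have hmax : max b p.2 = b := by omega
      by_cases h3 : p.2 = b
      · have hstep : ipFindStep true (some b, acc) p = (some b, acc ++ [p.1]) := by
          simp [ipFindStep, h1, h3]
        rw [hstep, ih b (acc ++ [p.1])]; simp only [hmax]
        by_cases h4 : t.foldl (fun m p => max m p.2) b = b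
        · simp [h3, h4]
        · have h4' : ¬ (b = t.foldl (fun m p => max m p.2) b) := fun h => h4 h.symm
          simp [h3, h4, h4']
      · have hstep : ipFindStep true (some b, acc) p = (some b, acc) := by
          simp [ipFindStep, h1, h3]
        rw [hstep, ih b acc]; simp only [hmax]
        have hne : p.2 ≠ t.foldl (fun m p => max m p.2) b := by
          have := hle b; omega
        simp [hne]

-- the same invariant for most_active = false (running minimum)
lemma scan_min (l : List (String × Int)) : ∀ (b : Int) (acc : List String),
    l.foldl (ipFindStep false) (some b, acc)
      = (some (l.foldl (fun m p => min m p.2) b),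
         (if l.foldl (fun m p => min m p.2) b = b then acc else [])
           ++ (l.filter (fun p => p.2 == l.foldl (fun m p => min m p.2) b)).map (fun p => p.1)) := by
  induction l with
  | nil => intro b acc; simp
  | cons p t ih =>
    intro b acc
    have hle : ∀ c : Int, t.foldl (fun m p => min m p.2) c ≤ c := foldl_min2_le t
    simp only [List.foldl_cons]
    by_cases h1 : p.2 < b
    · have hstep : ipFindStep false (some b, acc) p = (some p.2, [p.1]) := by
        simp [ipFindStep, h1]
      rw [hstep, ih p.2 [p.1]]
      have hmin : min b p.2 = p.2 := by omega
      simp only [hmin]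
      have hMb : t.foldl (fun m p => min m p.2) p.2 ≠ b := by
        have := hle p.2; omega
      by_cases h2 : p.2 = t.foldl (fun m p => min m p.2) p.2
      · simp [← h2, hMb]
        exact fun h => absurd h (by omega)
      · simp [hMb, Ne.symm h2, h2]
    · have hmin : min b p.2 = b := by omega
      by_cases h3 : p.2 = b
      · have hstep : ipFindStep false (some b, acc) p = (some b, acc ++ [p.1]) := by
          simp [ipFindStep, h1, h3]
        rw [hstep, ih b (acc ++ [p.1])]; simp only [hmin]
        by_cases h4 : t.foldl (fun m p => min m p.2) b = b
        · simp [h3, h4]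
        · have h4' : ¬ (b = t.foldl (fun m p => min m p.2) b) := fun h => h4 h.symm
          simp [h3, h4, h4']
      · have hstep : ipFindStep false (some b, acc) p = (some b, acc) := by
          simp [ipFindStep, h1, h3]
        rw [hstep, ih b acc]; simp only [hmin]
        have hne : p.2 ≠ t.foldl (fun m p => min m p.2) b := by
          have := hle b; omega
        simp [hne]

lemma insert_items_ne_nil (d : PySem.Dict String Int) (k : String) (v : Int) :
    (d.insert k v).items ≠ [] := by
  cases d with
  | mk l =>
    cases l with
    | nil => simp [PySem.Dict.items_insert]
    | cons a as =>
      rw [PySem.Dict.items_insert]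
      split_ifs <;> simp

lemma foldl_counts_ne_nil (l : List (List (String × String))) :
    ∀ d : PySem.Dict String Int, d.items ≠ [] →
      (l.foldl (fun d entry =>
        let ip := (PySem.Dict.mk entry).getD "ip" ""
        d.insert ip (d.getD ip 0 + 1)) d).items ≠ [] := by
  induction l with
  | nil => intro d h; exact h
  | cons e rest ih =>
    intro d _
    exact ih _ (insert_items_ne_nil _ _ _)

lemma counts_items_ne_nil (log_data : List (List (String × String))) (h : log_data ≠ []) :
    (ipRequestsNumber log_data).items ≠ [] := by
  cases log_data with
  | nil => exact absurd rfl h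
  | cons e rest =>
    exact foldl_counts_ne_nil rest _ (insert_items_ne_nil _ _ _)

-- ===== VERDICT (by name: the statement is the Claim_ definition above) =====
theorem ip_find_spec : Claim_equal_ip_find := by
  intro log_data most_active _ hpre
  unfold Spec_ip_find
  have hne := counts_items_ne_nil log_data hpre.1
  have halt : ip_find_alt log_data most_active
      = (((ipRequestsNumber log_data).items).foldl (ipFindStep most_active) (none, [])).2 := rfl
  rw [halt]
  obtain ⟨q, t, hl⟩ : ∃ q t, (ipRequestsNumber log_data).items = q :: t := by
    cases h : (ipRequestsNumber log_data).items with
    | nil => exact absurd h hne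
    | cons q t => exact ⟨q, t, rfl⟩
  have hstep0 : ipFindStep most_active (none, []) q = (some q.2, [q.1]) := by
    simp [ipFindStep]
  cases most_active with
  | true =>
    simp only [ip_find, PySem.Dict.values, hl, List.map_cons, List.foldl_cons, hstep0]
    rw [PySem.List.max?_id_cons, scan_max t q.2 [q.1]]
    rw [List.foldl_map]
    by_cases h2 : q.2 = t.foldl (fun m p => max m p.2) q.2
    · simp [List.filter_cons, ← h2]
    · simp [List.filter_cons, h2, Ne.symm h2]
  | false =>
    simp only [ip_find, PySem.Dict.values, hl, List.map_cons, List.foldl_cons, hstep0]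
    rw [PySem.List.min?_id_cons, scan_min t q.2 [q.1]]
    rw [List.foldl_map]
    by_cases h2 : q.2 = t.foldl (fun m p => min m p.2) q.2
    · simp [List.filter_cons, ← h2]
    · simp [List.filter_cons, h2, Ne.symm h2]
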